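-- pv_equiv track=rewrite | github.com/jonnymyarf/Alphabet---Dictionary-and-Acrostics-aka-EmergentAcronyms | Emergent_Acronyms_compare_txt_ATT.py | acro_map_complex
-- ===== SOURCE A (Python) =====
-- from collections import defaultdict, Counter
--
-- acro_map = defaultdict(list)
--
-- def acro_map_complex(words, n=5):
--     acro_map = defaultdict(list)
--     max_words = n
--
--     for i in range(len(words)):
--         for span in range(1, min(max_words+1, len(words)-i+1)):
--             # generate subword acronym
--             combined = ''.join(words[i+j][0] for j in range(span))  # first letters
--             if len(combined) >= n:
--                 symbol = combined[:n]
--                 acro_map[symbol].append(' '.join(words[i:i+span]))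
--
--     return acro_map
--
-- n = 2
-- ===== SOURCE B (Python) =====
-- def acro_map_complex(words, n=5):
--     result = {}
--     if n < 1:
--         return result
--     firsts = ''.join(w[0] for w in words)
--     for i in range(len(words) - n + 1):
--         key = firsts[i:i+n]
--         result.setdefault(key, []).append(' '.join(words[i:i+n]))
--     return result
-- ===== Notes on version B (the rewrite author's own statement) =====
-- stated objective: faster
-- what changed: A scans every span 1..n at every position and tests each acronym's length; B notes that only span-n windows can pass that test, precomputes the first-letter string once and emits one entry per length-n window in a single sliding pass.
import Mathlib
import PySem

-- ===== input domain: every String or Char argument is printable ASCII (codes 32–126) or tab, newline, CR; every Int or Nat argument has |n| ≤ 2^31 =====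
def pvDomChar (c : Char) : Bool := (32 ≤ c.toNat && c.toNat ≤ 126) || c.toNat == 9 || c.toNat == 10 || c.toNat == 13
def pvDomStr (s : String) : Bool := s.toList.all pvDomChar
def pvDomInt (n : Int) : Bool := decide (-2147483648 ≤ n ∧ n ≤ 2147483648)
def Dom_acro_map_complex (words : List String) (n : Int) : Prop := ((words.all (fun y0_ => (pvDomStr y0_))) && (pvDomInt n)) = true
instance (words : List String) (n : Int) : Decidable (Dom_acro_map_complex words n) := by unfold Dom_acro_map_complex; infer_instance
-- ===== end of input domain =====

-- B replaces A's per-position scan over all spans 1..n by a single pass over the span-n windows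
-- (only spans of length exactly n ever pass A's `len(combined) >= n` test), using a precomputed
-- first-letter sequence; equivalence of the RETURN value is proved on Pre_ (no mutation involved).

-- w[0] as both Pythons compute it; the empty-word case (Python IndexError) is excluded by Pre_.
def firstChar (w : String) : Char := (PySem.Str.pyGet? w 0).getD ' '

-- ===== PORT A =====
def acro_map_complex (words : List String) (n : Int) : List (String × List String) :=
  ((PySem.List.pyRange 0 (words.length : Int) 1).foldl (fun d i =>
      (PySem.List.pyRange 1 (min (n + 1) ((words.length : Int) - i + 1)) 1).foldl (fun d span =>
        -- combined = ''.join(words[i+j][0] for j in range(span)), kept as its code points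
        let combined : List Char :=
          (PySem.List.pyRange 0 span 1).map (fun j => firstChar (PySem.List.pyGetD words (i + j) ""))
        if n ≤ (combined.length : Int) then
          let symbol : String := String.ofList (PySem.List.slice combined (some 0) (some n))
          -- defaultdict(list): acro_map[symbol].append(' '.join(words[i:i+span]))
          d.modify symbol [] (· ++ [PySem.Str.join " " (PySem.List.slice words (some i) (some (i + span)))])
        else d) d)
    PySem.Dict.empty).items

-- ===== PORT B =====
def acro_map_complex_alt (words : List String) (n : Int) : List (String × List String) :=
  if n < 1 then []
  else
    let firsts : List Char := words.map firstChar
    ((PySem.List.pyRange 0 ((words.length : Int) - n + 1) 1).foldl (fun d i =>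
        let key : String := String.ofList (PySem.List.slice firsts (some i) (some (i + n)))
        -- result.setdefault(key, []).append(x)  ==  d[key] = d.get(key, []) + [x]
        d.modify key [] (· ++ [PySem.Str.join " " (PySem.List.slice words (some i) (some (i + n)))]))
      PySem.Dict.empty).items

-- ===== PRECONDITION & SPEC =====
-- Pre_ excludes only the inputs where both Pythons raise IndexError: n ≥ 1 with an empty string
-- among the words (every word's first character w[0] is read).
def Pre_acro_map_complex (words : List String) (n : Int) : Prop :=
  1 ≤ n → ∀ w ∈ words, w ≠ ""
instance (words : List String) (n : Int) : Decidable (Pre_acro_map_complex words n) := by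
  unfold Pre_acro_map_complex; infer_instance

def pvWitness_acro_map_complex : List String × Int := (["alpha", "bravo", "charlie"], 2)

def Spec_acro_map_complex (words : List String) (n : Int) (out : List (String × List String)) : Prop := out = acro_map_complex_alt words n
instance (words : List String) (n : Int) (out : List (String × List String)) : Decidable (Spec_acro_map_complex words n out) := by unfold Spec_acro_map_complex; infer_instance

-- ===== CLAIM (what is proved, stated in full; the proofs are below) =====
def Claim_equal_acro_map_complex : Prop := ∀ (words : List String) (n : Int), Dom_acro_map_complex words n → Pre_acro_map_complex words n → Spec_acro_map_complex words n (acro_map_complex words n)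

-- ===== LEMMAS AND PROOFS =====

lemma filter_lt_pyRange (a b c : Int) :
    (PySem.List.pyRange a b 1).filter (fun x => decide (x < c)) = PySem.List.pyRange a (min b c) 1 := by
  by_cases hab : b ≤ a
  · rw [PySem.List.pyRange_one_eq_nil hab, PySem.List.pyRange_one_eq_nil (by omega : min b c ≤ a)]
    rfl
  · by_cases hc : b ≤ c
    · rw [min_eq_left hc]
      apply List.filter_eq_self.2
      intro x hx
      rw [PySem.List.mem_pyRange_one] at hx
      simpa using (by omega : x < c)
    · by_cases hca : c ≤ a
      · rw [PySem.List.pyRange_one_eq_nil (by omega : min b c ≤ a)]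
        apply List.filter_eq_nil_iff.2
        intro x hx
        rw [PySem.List.mem_pyRange_one] at hx
        simpa using (by omega : ¬ x < c)
      · rw [PySem.List.pyRange_one_append a c b (by omega) (by omega), List.filter_append,
          min_eq_right (by omega : c ≤ b)]
        have h1 : (PySem.List.pyRange a c 1).filter (fun x => decide (x < c)) = PySem.List.pyRange a c 1 := by
          apply List.filter_eq_self.2
          intro x hx
          rw [PySem.List.mem_pyRange_one] at hx
          simpa using (by omega : x < c)
        have h2 : (PySem.List.pyRange c b 1).filter (fun x => decide (x < c)) = [] := by
          apply List.filter_eq_nil_iff.2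
          intro x hx
          rw [PySem.List.mem_pyRange_one] at hx
          simpa using (by omega : ¬ x < c)
        rw [h1, h2, List.append_nil]

-- A's span-n acronym at position i is the slice of the precomputed first-letter sequence.
lemma combined_eq_slice (words : List String) (i m : Int) (hi : 0 ≤ i) (hm : 0 ≤ m)
    (h : i + m ≤ (words.length : Int)) :
    (PySem.List.pyRange 0 m 1).map (fun j => firstChar (PySem.List.pyGetD words (i + j) "")) =
      PySem.List.slice (words.map firstChar) (some i) (some (i + m)) := by
  rw [PySem.List.slice_toNat _ hi (by omega)]
  have hsub : (i + m).toNat - i.toNat = m.toNat := by omega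
  rw [hsub]
  apply List.ext_getElem
  · simp [PySem.List.length_pyRange_one]
    omega
  · intro k h1 h2
    simp only [List.getElem_map, PySem.List.getElem_pyRange_one, List.getElem_take,
      List.getElem_drop]
    have hk : k < m.toNat := by
      simpa [PySem.List.length_pyRange_one] using h1
    rw [PySem.List.pyGetD_eq_getElem words "" (by omega) (by omega)]
    congr 2
    omega

-- A's inner span loop at position i contributes exactly the span-n window (or nothing).
lemma inner_eq (words : List String) (n : Int) (hn : 1 ≤ n) (i : Int) (hi0 : 0 ≤ i)
    (d : PySem.Dict String (List String)) :
    (PySem.List.pyRange 1 (min (n + 1) ((words.length : Int) - i + 1)) 1).foldl (fun d span =>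
        let combined : List Char :=
          (PySem.List.pyRange 0 span 1).map (fun j => firstChar (PySem.List.pyGetD words (i + j) ""))
        if n ≤ (combined.length : Int) then
          let symbol : String := String.ofList (PySem.List.slice combined (some 0) (some n))
          d.modify symbol [] (· ++ [PySem.Str.join " " (PySem.List.slice words (some i) (some (i + span)))])
        else d) d =
      (if i < (words.length : Int) - n + 1 then
        d.modify (String.ofList (PySem.List.slice (words.map firstChar) (some i) (some (i + n)))) []
          (· ++ [PySem.Str.join " " (PySem.List.slice words (some i) (some (i + n)))])
      else d) := by
  by_cases hiL : i < (words.length : Int) - n + 1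
  · rw [min_eq_left (by omega), if_pos hiL,
      PySem.List.pyRange_one_append 1 n (n + 1) (by omega) (by omega), List.foldl_append,
      PySem.List.pyRange_one_singleton,
      PySem.List.foldl_congr_mem _ _ (fun d _ => d) d ?small, PySem.List.foldl_ignore]
    case small =>
      intro acc span hsp
      rw [PySem.List.mem_pyRange_one] at hsp
      simp only [List.length_map, PySem.List.length_pyRange_one]
      rw [if_neg (by omega)]
    simp only [List.foldl_cons, List.foldl_nil]
    rw [combined_eq_slice words i n hi0 (by omega) (by omega)]
    rw [if_pos ?cond]
    case cond =>
      rw [PySem.List.slice_toNat _ hi0 (by omega)]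
      simp only [List.length_take, List.length_drop, List.length_map]
      omega
    congr 1
    rw [PySem.List.slice_toNat _ hi0 (by omega)]
    rw [PySem.List.slice_zero_start, PySem.List.slice_to _ (by omega)]
    rw [List.take_of_length_le (by simp only [List.length_take, List.length_drop, List.length_map]; omega)]
  · rw [min_eq_right (by omega), if_neg hiL,
      PySem.List.foldl_congr_mem _ _ (fun d _ => d) d ?allsmall, PySem.List.foldl_ignore]
    case allsmall =>
      intro acc span hsp
      rw [PySem.List.mem_pyRange_one] at hsp
      simp only [List.length_map, PySem.List.length_pyRange_one]
      rw [if_neg (by omega)]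

theorem acro_map_complex_spec : Claim_equal_acro_map_complex := by
  intro words n hdom hpre
  unfold Spec_acro_map_complex
  by_cases hn : n < 1
  · simp only [acro_map_complex, acro_map_complex_alt, if_pos hn]
    rw [PySem.List.foldl_congr_mem _ _ (fun d _ => d) _ ?empt, PySem.List.foldl_ignore]
    case empt =>
      intro acc i hi
      rw [PySem.List.pyRange_one_eq_nil (le_trans (min_le_left _ _) (by omega))]
      rfl
    rfl
  · simp only [acro_map_complex, acro_map_complex_alt, if_neg hn]
    rw [PySem.List.foldl_congr_mem _ _
        (fun d i => if i < (words.length : Int) - n + 1 then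
          d.modify (String.ofList (PySem.List.slice (words.map firstChar) (some i) (some (i + n)))) []
            (· ++ [PySem.Str.join " " (PySem.List.slice words (some i) (some (i + n)))])
        else d) _ ?inner]
    case inner =>
      intro acc i hi
      rw [PySem.List.mem_pyRange_one] at hi
      exact inner_eq words n (by omega) i (by omega) acc
    rw [PySem.List.foldl_ite_eq_foldl_filter (fun i => i < (words.length : Int) - n + 1) _ _ _,
      filter_lt_pyRange, min_eq_right (by omega)]

-- ===== VERDICT (by name: the statement is the Claim_ definition above) =====
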